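-- pv_equiv track=rewrite | github.com/qndn3tp/Programmers | 프로그래머스/lv2/70129. 이진 변환 반복하기/이진 변환 반복하기.py | solution
-- ===== SOURCE A (Python) =====
-- def binTrans(x):
--     x_deleted = x.replace("0", "")
--     return bin(len(x_deleted))[2:], len(x) - len(x_deleted) # 제거한 0의 개수 => 0 제거 전 문자열의 길이 - 제거 후 길이
--
-- def solution(s):
--     n_del0 = 0        # 제거 된 총 0의 개수
--     n_trans = 0       # 이진변환 횟수
--
--     while len(s) > 1:
--         n_trans += 1
--         s, n_del = binTrans(s)
--         n_del0 += n_del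
--
--     return([n_trans, n_del0])
-- ===== SOURCE B (Python) =====
-- def steps(c):
--     # transformations/zeros-removed needed to reduce the binary representation of c to length 1
--     if c <= 1:
--         return (0, 0)
--     ones = bin(c).count('1')
--     t, d = steps(ones)
--     return (1 + t, c.bit_length() - ones + d)
--
-- def solution(s):
--     if len(s) <= 1:
--         return [0, 0]
--     c = sum(ch != '0' for ch in s)
--     t, d = steps(c)
--     return [1 + t, (len(s) - c) + d]
-- ===== Notes on version B (the rewrite author's own statement) =====
-- stated objective: alternative
-- what changed: B peels off the single step that touches the string (one scan counting non-'0' chars), then replaces A's while-loop over rebuilt strings by a pure recursion on an integer that composes (transformations, deletions) pairs on the way back, never holding loop accumulators or string state.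
import Mathlib
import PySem

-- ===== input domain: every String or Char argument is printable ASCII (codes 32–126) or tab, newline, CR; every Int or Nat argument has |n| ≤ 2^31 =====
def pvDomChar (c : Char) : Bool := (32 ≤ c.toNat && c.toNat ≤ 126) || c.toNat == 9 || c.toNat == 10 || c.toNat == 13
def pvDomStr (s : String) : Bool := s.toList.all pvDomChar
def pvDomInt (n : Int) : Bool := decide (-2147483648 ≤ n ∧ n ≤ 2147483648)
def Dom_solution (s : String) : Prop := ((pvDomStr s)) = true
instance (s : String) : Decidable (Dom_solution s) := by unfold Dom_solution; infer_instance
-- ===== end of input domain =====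

-- B peels the one string-touching step off and replaces A's accumulator loop by a pure
-- integer recursion composing result pairs on return; return values proved equal on all strings.

-- ===== PORT A =====

-- hand port of bin(n)[2:] for n > 0: binary digits, most significant first (exact for n > 0)
def binCharsA (n : Nat) : List Char :=
  if h : n = 0 then [] else binCharsA (n / 2) ++ [if n % 2 == 1 then '1' else '0']
  decreasing_by exact Nat.div_lt_self (Nat.pos_of_ne_zero h) (by norm_num)

-- bin(n)[2:] including bin(0)[2:] = "0"
def pyBinA (n : Nat) : List Char := if n = 0 then ['0'] else binCharsA n

def binTrans (x : String) : String × Int :=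
  let xd := PySem.Str.replace x "0" ""
  (String.ofList (pyBinA xd.toList.length), PySem.Str.len x - PySem.Str.len xd)

-- number of non-'0' characters (the length after x.replace("0","")); used by the termination measure
def onesCnt (l : List Char) : Nat := (l.filter (fun c => c ≠ '0')).length

-- the lemmas below are stated before solutionGo because its decreasing_by cites them
theorem repgo (l : List Char) : ∀ (fuel : Nat) (acc : List Char), l.length ≤ fuel →
    PySem.Chars.replace.go ['0'] [] fuel l acc = acc.reverse ++ l.filter (fun c => c ≠ '0') := by
  induction l with
  | nil => intro fuel acc h; cases fuel <;> simp [PySem.Chars.replace.go]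
  | cons c t ih =>
    intro fuel acc h
    cases fuel with
    | zero => simp at h
    | succ f =>
      rw [PySem.Chars.replace.go]
      by_cases hc : c = '0'
      · subst hc
        simp [List.isPrefixOf, ih f acc (by simpa using h)]
      · have hp : List.isPrefixOf ['0'] (c :: t) = false := by
          simp [List.isPrefixOf]
          exact fun h' => absurd h'.symm hc
        simp [hp, ih f (c :: acc) (by simpa using h), hc]

theorem replace_zero_eq_filter (l : List Char) :
    PySem.Chars.replace l ['0'] [] = l.filter (fun c => c ≠ '0') := by
  rw [PySem.Chars.replace]
  rw [if_neg (by simp), repgo l l.length [] le_rfl]; simp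

theorem length_binCharsA (n : Nat) : (binCharsA n).length = PySem.Int.bitLength (n : Int) := by
  induction n using Nat.strong_induction_on with
  | _ n ih =>
    rw [binCharsA]
    by_cases h : n = 0
    · simp [h]
    · rw [dif_neg h, PySem.Int.bitLength_natCast (m := n) (Nat.pos_of_ne_zero h)]
      simp [ih (n / 2) (Nat.div_lt_self (Nat.pos_of_ne_zero h) (by norm_num))]

theorem onesCnt_binCharsA (n : Nat) : onesCnt (binCharsA n) = PySem.Int.bitCount (n : Int) := by
  induction n using Nat.strong_induction_on with
  | _ n ih =>
    rw [binCharsA]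
    by_cases h : n = 0
    · simp [h, onesCnt]
    · rw [dif_neg h, PySem.Int.bitCount_natCast (m := n) (Nat.pos_of_ne_zero h)]
      have ih' := ih (n / 2) (Nat.div_lt_self (Nat.pos_of_ne_zero h) (by norm_num))
      have h2 : n % 2 = 0 ∨ n % 2 = 1 := Nat.mod_two_eq_zero_or_one n
      unfold onesCnt at ih' ⊢
      rcases h2 with h2 | h2
      · rw [List.filter_append, List.length_append, ih']
        simp [h2]
      · rw [List.filter_append, List.length_append, ih']
        simp [h2]
        omega

theorem bitCount_le (n : Nat) : PySem.Int.bitCount (n : Int) ≤ n := by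
  induction n using Nat.strong_induction_on with
  | _ n ih =>
    by_cases h : n = 0
    · simp [h]
    · rw [PySem.Int.bitCount_natCast (m := n) (Nat.pos_of_ne_zero h)]
      have := ih (n / 2) (Nat.div_lt_self (Nat.pos_of_ne_zero h) (by norm_num))
      omega

theorem bitCount_lt (n : Nat) (h : 2 ≤ n) : PySem.Int.bitCount (n : Int) < n := by
  rw [PySem.Int.bitCount_natCast (m := n) (by omega)]
  have h1 := bitCount_le (n / 2)
  by_cases h2 : n / 2 = 1
  · rw [h2]
    have h3 : PySem.Int.bitCount ((1 : Nat) : Int) = 1 := by decide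
    rw [h3]; omega
  · have h3 : 2 ≤ n / 2 := by omega
    have := bitCount_lt (n / 2) h3
    omega

theorem length_pyBinA (n : Nat) :
    (pyBinA n).length = if n = 0 then 1 else PySem.Int.bitLength (n : Int) := by
  unfold pyBinA
  by_cases h : n = 0
  · simp [h]
  · simp [h, length_binCharsA]

theorem onesCnt_pyBinA (n : Nat) : onesCnt (pyBinA n) = PySem.Int.bitCount (n : Int) := by
  unfold pyBinA
  by_cases h : n = 0
  · subst h; decide
  · simp [h, onesCnt_binCharsA]

theorem step_toList (s : String) : (binTrans s).1.toList = pyBinA (onesCnt s.toList) := by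
  unfold binTrans onesCnt
  simp [replace_zero_eq_filter]

theorem bitCount_one : PySem.Int.bitCount ((1 : Nat) : Int) = 1 := by decide
theorem bitLength_one : PySem.Int.bitLength ((1 : Nat) : Int) = 1 := by decide

def solutionGo (s : String) (ntrans ndel : Int) : List Int :=
  if PySem.Str.len s > 1 then
    let p := binTrans s
    solutionGo p.1 (ntrans + 1) (ndel + p.2)
  else [ntrans, ndel]
  termination_by (onesCnt s.toList, s.toList.length)
  decreasing_by
    have hlen : 1 < s.toList.length := by
      have := ‹PySem.Str.len s > 1›
      rw [PySem.Str.len_eq] at this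
      exact_mod_cast this
    rw [step_toList]
    rcases Nat.lt_or_ge (onesCnt s.toList) 2 with hc | hc
    · apply Prod.Lex.right'
      · rw [onesCnt_pyBinA]
        interval_cases h : (onesCnt s.toList)
        · simp
        · rw [bitCount_one]
      · rw [length_pyBinA]
        split <;> [omega; skip]
        rw [(by omega : onesCnt s.toList = 1), bitLength_one]
        omega
    · apply Prod.Lex.left
      rw [onesCnt_pyBinA]
      exact bitCount_lt _ hc

def solution (s : String) : List Int := solutionGo s 0 0

-- ===== PORT B =====

-- steps(c): pure recursion composing (transformations, deletions) on the way back
def stepsB (c : Int) : Int × Int :=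
  if c ≤ 1 then (0, 0)
  else
    let ones : Int := (PySem.Int.bitCount c : Int)
    let p := stepsB ones
    (1 + p.1, ((PySem.Int.bitLength c : Int) - ones) + p.2)
  termination_by c.toNat
  decreasing_by
    have h2 : 2 ≤ c.toNat := by omega
    have hcast : ((c.toNat : Nat) : Int) = c := by omega
    have := bitCount_lt c.toNat h2
    rw [hcast] at this
    omega

def solution_alt (s : String) : List Int :=
  if PySem.Str.len s ≤ 1 then [0, 0]
  else
    let c : Int := ((s.toList.countP (fun ch => ch ≠ '0') : Nat) : Int)
    let p := stepsB c
    [1 + p.1, (PySem.Str.len s - c) + p.2]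

-- ===== PRECONDITION & SPEC =====
def Spec_solution (s : String) (out : List Int) : Prop := out = solution_alt s
instance (s : String) (out : List Int) : Decidable (Spec_solution s out) := by unfold Spec_solution; infer_instance

-- ===== CLAIM (what is proved, stated in full; the proofs are below) =====
def Claim_equal_solution : Prop := ∀ (s : String), Dom_solution s → Spec_solution s (solution s)

-- ===== LEMMAS AND PROOFS =====

theorem onesCnt_eq_countP (l : List Char) : onesCnt l = l.countP (fun c => c ≠ '0') := by
  unfold onesCnt
  rw [List.countP_eq_length_filter]

-- simp normal form of the filter in onesCnt
theorem filter_len_ones (l : List Char) :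
    (List.filter (fun c => !decide (c = '0')) l).length = onesCnt l := by
  unfold onesCnt
  rw [show (fun c : Char => decide (c ≠ '0')) = (fun c => !decide (c = '0')) from
    funext fun c => by simp]

theorem bitLength_two_le (n : Nat) (h : 2 ≤ n) : 2 ≤ PySem.Int.bitLength (n : Int) := by
  rw [PySem.Int.bitLength_natCast (m := n) (by omega)]
  have : n / 2 ≠ 0 := by omega
  rw [PySem.Int.bitLength_natCast (m := n / 2) (Nat.pos_of_ne_zero this)]
  omega

-- A's loop over the binary string of c equals B's recursion on c
theorem go_bin (c : Nat) (t d : Int) :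
    solutionGo (String.ofList (pyBinA c)) t d = [t + (stepsB (c : Int)).1, d + (stepsB (c : Int)).2] := by
  induction c using Nat.strong_induction_on generalizing t d with
  | _ c ih =>
    rw [solutionGo]
    by_cases hc : c ≤ 1
    · have hlen : (pyBinA c).length = 1 := by
        rw [length_pyBinA]
        interval_cases c
        · simp
        · simpa using bitLength_one
      rw [if_neg (by rw [PySem.Str.len_eq]; simp [hlen])]
      rw [stepsB, if_pos (by exact_mod_cast hc)]
      simp
    · have h2 : 2 ≤ c := by omega
      have hbl := bitLength_two_le c h2
      have hlen2 : 2 ≤ (pyBinA c).length := by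
        rw [length_pyBinA, if_neg (by omega : ¬ c = 0)]; exact hbl
      rw [if_pos (by rw [PySem.Str.len_eq]; simp; exact_mod_cast (by omega : 1 < (pyBinA c).length))]
      have hones : onesCnt (String.ofList (pyBinA c)).toList = PySem.Int.bitCount (c : Int) := by
        simp [onesCnt_pyBinA]
      have hfst : (binTrans (String.ofList (pyBinA c))).1 =
          String.ofList (pyBinA (PySem.Int.bitCount (c : Int))) := by
        have := step_toList (String.ofList (pyBinA c))
        rw [hones] at this
        apply String.ext
        simpa using this
      have hsnd : (binTrans (String.ofList (pyBinA c))).2 =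
          (PySem.Int.bitLength (c : Int) : Int) - (PySem.Int.bitCount (c : Int) : Int) := by
        have h1 : onesCnt (pyBinA c) = PySem.Int.bitCount (c : Int) := onesCnt_pyBinA c
        unfold onesCnt at h1
        unfold binTrans
        simp [replace_zero_eq_filter, PySem.Str.len_eq, length_pyBinA]
        rw [if_neg (by omega : ¬ c = 0), filter_len_ones, onesCnt_pyBinA]
      show solutionGo (binTrans (String.ofList (pyBinA c))).1 (t + 1)
          (d + (binTrans (String.ofList (pyBinA c))).2) = _
      rw [hfst, hsnd]
      rw [ih (PySem.Int.bitCount (c : Int)) (bitCount_lt c h2)]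
      conv_rhs => rw [stepsB]
      rw [if_neg (by exact_mod_cast hc : ¬ (c : Int) ≤ 1)]
      simp
      constructor <;> ring

-- ===== VERDICT (by name: the statement is the Claim_ definition above) =====
theorem solution_spec : Claim_equal_solution := by
  intro s _
  unfold Spec_solution solution solution_alt
  by_cases h : PySem.Str.len s > 1
  · rw [solutionGo, if_pos h, if_neg (by omega)]
    have hfst : (binTrans s).1 = String.ofList (pyBinA (onesCnt s.toList)) := by
      apply String.ext
      simpa using step_toList s
    have hsnd : (binTrans s).2 = PySem.Str.len s - (onesCnt s.toList : Int) := by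
      unfold binTrans
      simp [replace_zero_eq_filter, PySem.Str.len_eq]
      rw [filter_len_ones]
    show solutionGo (binTrans s).1 (0 + 1) (0 + (binTrans s).2) = _
    rw [hfst, hsnd, go_bin, onesCnt_eq_countP]
    simp
  · rw [solutionGo, if_neg h, if_pos (by omega)]
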